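-- pv_equiv track=rewrite | github.com/pchudzik/adventofcode | 2016/14_one_time_pad.py | has_chars_in_row
-- ===== SOURCE A (Python) =====
-- def has_chars_in_row(hash, number_of_characters, expected_char=None):
--     for idx in range(len(hash) - number_of_characters + 1):
--         substr = hash[idx:idx + number_of_characters]
--
--         char_to_find = expected_char
--         if char_to_find is None:
--             char_to_find = substr[0]
--
--         if substr == len(substr) * char_to_find:
--             return char_to_find
-- ===== SOURCE B (Python) =====
-- def has_chars_in_row(hash, number_of_characters, expected_char=None):
--     if number_of_characters <= 0:
--         # a run of non-positive length trivially exists at the start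
--         return expected_char
--     count = 0
--     prev = None
--     for c in hash:
--         count = count + 1 if c == prev else 1
--         prev = c
--         if count >= number_of_characters and (expected_char is None or c == expected_char):
--             return c
--     return None
-- ===== Notes on version B (the rewrite author's own statement) =====
-- stated objective: faster
-- what changed: Replaces A's sliding-window scan (re-extracting and comparing a length-n substring at every start index) by a single run-length pass that keeps one counter of consecutive equal characters and returns as soon as it reaches number_of_characters with a matching character.
-- outside the precondition, e.g. on has_chars_in_row('!c', -1, None): A returns '!', B returns None
import Mathlib
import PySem

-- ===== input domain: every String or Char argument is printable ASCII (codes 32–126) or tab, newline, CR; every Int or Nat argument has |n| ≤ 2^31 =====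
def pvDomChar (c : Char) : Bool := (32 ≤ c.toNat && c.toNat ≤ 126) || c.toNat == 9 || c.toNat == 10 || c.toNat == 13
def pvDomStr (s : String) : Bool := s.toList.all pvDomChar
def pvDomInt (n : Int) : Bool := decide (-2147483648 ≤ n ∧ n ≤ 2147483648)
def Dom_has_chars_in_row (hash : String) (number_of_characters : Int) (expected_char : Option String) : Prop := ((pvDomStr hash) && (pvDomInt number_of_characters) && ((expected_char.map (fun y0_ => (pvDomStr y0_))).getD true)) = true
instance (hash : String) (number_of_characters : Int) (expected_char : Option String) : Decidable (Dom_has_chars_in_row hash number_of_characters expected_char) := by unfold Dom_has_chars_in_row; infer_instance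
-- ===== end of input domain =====

-- B replaces A's quadratic sliding-window scan by a single run-length pass (one counter, one traversal).

-- ===== PORT A =====
-- the for-loop over range(len(hash) - number_of_characters + 1)
def pvLoopA (cs : List Char) (n : Int) (expected : Option String) : List Int → Option String
  | [] => none
  | idx :: rest =>
    let substr := PySem.List.slice cs (some idx) (some (idx + n))
    let ctf? : Option String :=
      match expected with
      | some s => some s
      | none => (PySem.List.pyGet? substr 0).map (fun c => String.ofList [c])
    match ctf? with
    | none => none  -- substr[0] raises IndexError in Python; excluded by Pre_
    | some ctf =>
      if substr = PySem.List.pyRepeat ctf.toList (substr.length : Int) then some ctf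
      else pvLoopA cs n expected rest

def has_chars_in_row (hash : String) (number_of_characters : Int) (expected_char : Option String) : Option String :=
  pvLoopA hash.toList number_of_characters expected_char
    (PySem.List.pyRange 0 ((hash.toList.length : Int) - number_of_characters + 1) 1)

-- ===== PORT B =====
-- the run-length for-loop over the characters (prev, count accumulators)
def pvLoopB (n : Int) (expected : Option String) : List Char → Option Char → Int → Option String
  | [], _, _ => none
  | c :: rest, prev, count =>
    let count' := if some c = prev then count + 1 else 1
    if n ≤ count' ∧ (expected = none ∨ expected = some (String.ofList [c]))
    then some (String.ofList [c])
    else pvLoopB n expected rest (some c) count'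

def has_chars_in_row_alt (hash : String) (number_of_characters : Int) (expected_char : Option String) : Option String :=
  if number_of_characters ≤ 0 then expected_char
  else pvLoopB number_of_characters expected_char hash.toList none 0

-- ===== PRECONDITION & SPEC =====
-- Pre_ excludes inputs with number_of_characters ≤ 0 and expected_char None: there A raises
-- IndexError on the empty window unless Python's negative-slice wraparound accidentally
-- produces a constant window first — a crash mixed with a wraparound artefact.
def Pre_has_chars_in_row (hash : String) (number_of_characters : Int) (expected_char : Option String) : Prop :=
  expected_char = none → 1 ≤ number_of_characters
instance (hash : String) (number_of_characters : Int) (expected_char : Option String) : Decidable (Pre_has_chars_in_row hash number_of_characters expected_char) := by unfold Pre_has_chars_in_row; infer_instance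

def pvWitness_has_chars_in_row : String × Int × Option String := ("aab", 2, none)

def Spec_has_chars_in_row (hash : String) (number_of_characters : Int) (expected_char : Option String) (out : Option String) : Prop := out = has_chars_in_row_alt hash number_of_characters expected_char
instance (hash : String) (number_of_characters : Int) (expected_char : Option String) (out : Option String) : Decidable (Spec_has_chars_in_row hash number_of_characters expected_char out) := by unfold Spec_has_chars_in_row; infer_instance

-- ===== CLAIM (what is proved, stated in full; the proofs are below) =====
def Claim_equal_has_chars_in_row : Prop := ∀ (hash : String) (number_of_characters : Int) (expected_char : Option String), Dom_has_chars_in_row hash number_of_characters expected_char → Pre_has_chars_in_row hash number_of_characters expected_char → Spec_has_chars_in_row hash number_of_characters expected_char (has_chars_in_row hash number_of_characters expected_char)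

-- ===== LEMMAS AND PROOFS =====

-- common reference recursion: first window of length m that is constant (to the target, if given)
def pvAux (m : Nat) (t : Option Char) : List Char → Option Char
  | [] => none
  | c :: rest =>
    if m ≤ (c :: rest).length ∧ List.take m (c :: rest) = List.replicate m (t.getD c)
    then some (t.getD c)
    else pvAux m t rest

theorem pvAux_short {m : Nat} (t : Option Char) (xs : List Char) (h : xs.length < m) :
    pvAux m t xs = none := by
  induction xs with
  | nil => rfl
  | cons c rest ih =>
    rw [pvAux, if_neg, ih (by simpa using Nat.lt_of_succ_lt h)]
    rintro ⟨h1, -⟩; omega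

theorem pvAux_replicate {m : Nat} (t : Option Char) (p : Char) (J : Nat) (hm : 1 ≤ m)
    (h : t.getD p ≠ p ∨ J < m) : pvAux m t (List.replicate J p) = none := by
  rcases h with h | h
  · induction J with
    | zero => rfl
    | succ J ih =>
      rw [List.replicate_succ, pvAux, if_neg]
      · exact ih
      rintro ⟨-, h2⟩
      have h0 := congrArg (fun l => l[0]?) h2
      simp only [← List.replicate_succ, List.take_replicate, List.getElem?_replicate] at h0
      rw [if_pos (by omega), if_pos (by omega)] at h0
      exact h (by simpa using h0.symm)
  · exact pvAux_short t _ (by simpa using h)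

theorem pvTake_replicate_append {m J : Nat} (p : Char) (ys : List Char) (h : m ≤ J) :
    List.take m (List.replicate J p ++ ys) = List.replicate m p := by
  rw [List.take_append_of_le_length (by simpa using h), List.take_replicate, Nat.min_eq_left h]

theorem pvTake_append_cons_ne {m J : Nat} (p c : Char) (ys : List Char) (hm : J < m)
    (hc : c ≠ p) : List.take m (List.replicate J p ++ c :: ys) ≠ List.replicate m p := by
  intro h
  have h0 := congrArg (fun l => l[J]?) h
  simp only [List.getElem?_take, List.getElem?_replicate] at h0
  rw [if_pos hm, if_pos hm, List.getElem?_append_right (by simp), List.length_replicate] at h0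
  simp at h0
  exact hc h0

theorem pvAux_skip {m : Nat} (t : Option Char) (p c : Char) (rest : List Char) (hm : 1 ≤ m)
    (hc : c ≠ p) : ∀ J, (t.getD p ≠ p ∨ J < m) →
    pvAux m t (List.replicate J p ++ c :: rest) = pvAux m t (c :: rest) := by
  intro J
  induction J with
  | zero => intro _; rfl
  | succ J ih =>
    intro h
    rw [List.replicate_succ, List.cons_append, pvAux, if_neg]
    · exact ih (by rcases h with h | h; exact Or.inl h; exact Or.inr (by omega))
    rintro ⟨-, h2⟩
    rw [← List.cons_append, ← List.replicate_succ] at h2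
    by_cases htp : t.getD p = p
    · rw [htp] at h2
      have hJm : J + 1 < m := by rcases h with h | h; exact absurd htp h; exact h
      exact pvTake_append_cons_ne p c rest hJm hc h2
    · have h0 := congrArg (fun l => l[0]?) h2
      simp only [List.getElem?_take, List.getElem?_replicate] at h0
      rw [if_pos (by omega), if_pos (by omega)] at h0
      rw [List.getElem?_append_left (by simp : 0 < (List.replicate (J+1) p).length),
          List.getElem?_replicate, if_pos (by omega)] at h0
      exact htp (by simpa using h0.symm)

theorem pvAux_head_one (t : Option Char) (c : Char) (rest : List Char) (hc : t.getD c = c) :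
    pvAux 1 t (c :: rest) = some c := by
  rw [pvAux, if_pos]
  · rw [hc]
  · exact ⟨by simp, by simp [hc]⟩

-- the B loop with a live run (prev = p, count = k) equals pvAux on k copies of p glued in front
theorem pvMainB (n : Int) (expected : Option String) (t : Option Char) (hn : 1 ≤ n)
    (hct : ∀ c : Char, (expected = none ∨ expected = some (String.ofList [c])) ↔ t.getD c = c) :
    ∀ (cs : List Char) (p : Char) (k : Int), 1 ≤ k →
    ¬ (n ≤ k ∧ (expected = none ∨ expected = some (String.ofList [p]))) →
    pvLoopB n expected cs (some p) k
      = (pvAux n.toNat t (List.replicate k.toNat p ++ cs)).map (fun c => String.ofList [c]) := by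
  intro cs
  induction cs with
  | nil =>
    intro p k hk hinv
    rw [List.append_nil, pvLoopB, pvAux_replicate t p k.toNat (by omega)]
    · rfl
    by_cases htp : t.getD p = p
    · right
      have hnk : ¬ n ≤ k := fun hle => hinv ⟨hle, (hct p).mpr htp⟩
      omega
    · exact Or.inl htp
  | cons c rest ih =>
    intro p k hk hinv
    rw [pvLoopB]
    by_cases hcp : c = p
    · subst hcp
      rw [if_pos (rfl : (some c : Option Char) = some c)]
      have hlist : List.replicate k.toNat c ++ c :: rest
          = List.replicate (k.toNat + 1) c ++ rest := by
        rw [List.replicate_succ', List.append_assoc, List.singleton_append]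
      by_cases htr : n ≤ k + 1 ∧ (expected = none ∨ expected = some (String.ofList [c]))
      · rw [if_pos htr, hlist]
        have htc : t.getD c = c := (hct c).mp htr.2
        have hm1 : n.toNat ≤ k.toNat + 1 := by have h1 := htr.1; omega
        rw [List.replicate_succ, List.cons_append, pvAux, if_pos]
        · simp [htc]
        refine ⟨by simp; omega, ?_⟩
        rw [← List.cons_append, ← List.replicate_succ,
            pvTake_replicate_append c rest hm1, htc]
      · rw [if_neg htr, ih c (k + 1) (by omega) htr, hlist,
            show ((k : Int) + 1).toNat = k.toNat + 1 from by omega]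
    · have : ¬ (some c = some p) := by simpa using hcp
      rw [if_neg this]
      have hskip : pvAux n.toNat t (List.replicate k.toNat p ++ c :: rest)
          = pvAux n.toNat t (c :: rest) := by
        apply pvAux_skip t p c rest (by omega) hcp
        by_cases htp : t.getD p = p
        · right
          have hnk : ¬ n ≤ k := fun hle => hinv ⟨hle, (hct p).mpr htp⟩
          omega
        · exact Or.inl htp
      rw [hskip]
      by_cases htr : n ≤ 1 ∧ (expected = none ∨ expected = some (String.ofList [c]))
      · rw [if_pos htr]
        have hm1 : n.toNat = 1 := by have h1 := htr.1; omega
        rw [hm1, pvAux_head_one t c rest ((hct c).mp htr.2)]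
        rfl
      · rw [if_neg htr, ih c 1 (by omega) htr]
        norm_num

theorem pvInitB (n : Int) (expected : Option String) (t : Option Char) (hn : 1 ≤ n)
    (hct : ∀ c : Char, (expected = none ∨ expected = some (String.ofList [c])) ↔ t.getD c = c)
    (cs : List Char) :
    pvLoopB n expected cs none 0
      = (pvAux n.toNat t cs).map (fun c => String.ofList [c]) := by
  cases cs with
  | nil => rfl
  | cons c rest =>
    rw [pvLoopB]
    rw [if_neg (by simp : ¬ (some c = (none : Option Char)))]
    by_cases htr : n ≤ (1:Int) ∧ (expected = none ∨ expected = some (String.ofList [c]))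
    · rw [if_pos htr]
      have hm1 : n.toNat = 1 := by have h1 := htr.1; omega
      rw [hm1, pvAux_head_one t c rest ((hct c).mp htr.2)]
      rfl
    · rw [if_neg htr, pvMainB n expected t hn hct rest c 1 (by omega) htr]
      norm_num

-- the A loop, started at window index i, equals pvAux on the i-th tail
theorem pvBridgeA (n : Int) (expected : Option String) (t : Option Char) (hn : 1 ≤ n)
    (hco : (expected = none ∧ t = none)
         ∨ ∃ e, expected = some (String.ofList [e]) ∧ t = some e)
    (cs : List Char) :
    ∀ (j i : Nat), cs.length ≤ i + j →
    pvLoopA cs n expected (PySem.List.pyRange (i : Int) ((cs.length : Int) - n + 1) 1)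
      = (pvAux n.toNat t (cs.drop i)).map (fun c => String.ofList [c]) := by
  intro j
  induction j with
  | zero =>
    intro i hi
    rw [PySem.List.pyRange_one_eq_nil (by omega), List.drop_eq_nil_of_le (by omega)]
    rfl
  | succ j ih =>
    intro i hi
    by_cases hib : (i : Int) < (cs.length : Int) - n + 1
    · have hsub : PySem.List.slice cs (some (i : Int)) (some ((i : Int) + n))
          = List.take n.toNat (List.drop i cs) := by
        rw [PySem.List.slice_toNat cs (by omega) (by omega)]
        congr 2 <;> omega
      have hlen : n.toNat ≤ (List.drop i cs).length := by
        rw [List.length_drop]; omega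
      rcases hds : List.drop i cs with _ | ⟨c₀, tl⟩
      · rw [hds] at hlen; simp at hlen; omega
      rw [hds] at hsub hlen
      have hm1 : ∃ m', n.toNat = m' + 1 := ⟨n.toNat - 1, by omega⟩
      obtain ⟨m', hm'⟩ := hm1
      have hhead : PySem.List.pyGet? (List.take n.toNat (c₀ :: tl)) 0 = some c₀ := by
        rw [hm', List.take_succ_cons, PySem.List.pyGet?_zero_cons]
      have hslen : (List.take n.toNat (c₀ :: tl)).length = n.toNat := by
        rw [List.length_take]; simp at hlen ⊢; omega
      have hrec : pvLoopA cs n expected (PySem.List.pyRange ((i : Int) + 1) ((cs.length : Int) - n + 1) 1)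
          = (pvAux n.toNat t tl).map (fun c => String.ofList [c]) := by
        have := ih (i + 1) (by omega)
        rw [← List.tail_drop, hds] at this
        simpa using this
      -- the window test of A is exactly the guard of pvAux
      rcases hco with ⟨he, ht⟩ | ⟨e, he, ht⟩
      · subst he; subst ht
        rw [PySem.List.pyRange_one_cons hib, pvLoopA]
        simp only [hsub, hhead, Option.map_some, hslen]
        rw [String.toList_ofList, PySem.List.pyRepeat_singleton, Int.toNat_natCast]
        by_cases hcond : List.take n.toNat (c₀ :: tl) = List.replicate n.toNat c₀
        · rw [if_pos hcond, pvAux, if_pos ⟨by simpa using hlen, by simpa using hcond⟩]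
          rfl
        · rw [if_neg hcond, pvAux, if_neg, hrec]
          rintro ⟨-, h2⟩
          exact hcond (by simpa using h2)
      · subst he; subst ht
        rw [PySem.List.pyRange_one_cons hib, pvLoopA]
        simp only [hsub, hslen]
        rw [String.toList_ofList, PySem.List.pyRepeat_singleton, Int.toNat_natCast]
        by_cases hcond : List.take n.toNat (c₀ :: tl) = List.replicate n.toNat e
        · rw [if_pos hcond, pvAux, if_pos ⟨by simpa using hlen, by simpa using hcond⟩]
          rfl
        · rw [if_neg hcond, pvAux, if_neg, hrec]
          rintro ⟨-, h2⟩
          exact hcond (by simpa using h2)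
    · rw [PySem.List.pyRange_one_eq_nil (by omega)]
      rw [pvAux_short t _ (by rw [List.length_drop]; omega)]
      rfl

-- multi-character (or empty) expected_char never matches: window lengths differ
theorem pvLengthRepeat (xs : List Char) (J : Nat) :
    (PySem.List.pyRepeat xs (J : Int)).length = J * xs.length := by
  simp [PySem.List.pyRepeat]

theorem pvNeverA (cs : List Char) (n : Int) (s : String) (hn : 1 ≤ n)
    (hs : s.toList.length ≠ 1) :
    ∀ l : List Int, (∀ idx ∈ l, 0 ≤ idx ∧ idx + n ≤ (cs.length : Int)) →
    pvLoopA cs n (some s) l = none := by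
  intro l
  induction l with
  | nil => intro _; rfl
  | cons idx rest ih =>
    intro hmem
    obtain ⟨h0, h1⟩ := hmem idx (by simp)
    simp only [pvLoopA]
    rw [if_neg, ih (fun x hx => hmem x (by simp [hx]))]
    intro h
    have hlen := congrArg List.length h
    rw [PySem.List.slice_toNat cs h0 (by omega), List.length_take, List.length_drop,
        pvLengthRepeat] at hlen
    have h2 : (idx + n).toNat - idx.toNat = n.toNat := by omega
    rw [h2] at hlen
    have h3 : min n.toNat (cs.length - idx.toNat) = n.toNat := by omega
    rw [h3] at hlen
    have h7 : 1 ≤ n.toNat := by omega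
    rcases Nat.lt_or_ge s.toList.length 1 with h5 | h5
    · have h6 : s.toList.length = 0 := by omega
      rw [h6] at hlen; omega
    · have h6 : 2 ≤ s.toList.length := by omega
      nlinarith [hlen, h6, h7]

theorem pvNeverB (n : Int) (s : String) (hs : s.toList.length ≠ 1) :
    ∀ (cs : List Char) (prev : Option Char) (k : Int),
    pvLoopB n (some s) cs prev k = none := by
  intro cs
  induction cs with
  | nil => intro _ _; rfl
  | cons c rest ih =>
    intro prev k
    rw [pvLoopB, if_neg, ih]
    rintro ⟨-, h | h⟩
    · simp at h
    · rw [Option.some.injEq] at h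
      apply hs
      rw [h, String.toList_ofList]
      rfl

-- n ≤ 0 with expected_char given: A matches the empty window at idx = -n and returns expected_char
theorem pvLoopA_none_or_exp (cs : List Char) (n : Int) (s : String) :
    ∀ l : List Int, pvLoopA cs n (some s) l = none ∨ pvLoopA cs n (some s) l = some s := by
  intro l
  induction l with
  | nil => exact Or.inl rfl
  | cons idx rest ih =>
    rw [pvLoopA]
    split_ifs
    · exact Or.inr rfl
    · exact ih

theorem pvLoopA_hits (cs : List Char) (n : Int) (s : String) (hn : n ≤ 0) :
    ∀ l : List Int, (-n) ∈ l → pvLoopA cs n (some s) l ≠ none := by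
  intro l
  induction l with
  | nil => intro h; simp at h
  | cons idx rest ih =>
    intro hmem
    rw [pvLoopA]
    split_ifs with hcond
    · simp
    · intro hcontra
      rcases List.mem_cons.mp hmem with heq | hmem'
      · subst heq
        apply hcond
        have h0 : PySem.List.slice cs (some (-n)) (some (-n + n)) = [] := by
          rw [PySem.List.slice_toNat cs (by omega) (by omega)]
          have h9 : (-n + n).toNat - (-n).toNat = 0 := by omega
          rw [h9]
          rfl
        rw [h0]
        rfl
      · exact ih hmem' hcontra

-- ===== VERDICT (by name: the statement is the Claim_ definition above) =====
theorem has_chars_in_row_spec : Claim_equal_has_chars_in_row := by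
  intro hash n expected _ hpre
  unfold Spec_has_chars_in_row has_chars_in_row has_chars_in_row_alt
  unfold Pre_has_chars_in_row at hpre
  set cs := hash.toList with hcs
  by_cases hn : n ≤ 0
  · rw [if_pos hn]
    rcases hexp : expected with _ | s
    · exact absurd (hpre hexp) (by omega)
    · rcases pvLoopA_none_or_exp cs n s (PySem.List.pyRange 0 ((cs.length : Int) - n + 1) 1)
        with h | h
      · exact absurd h (pvLoopA_hits cs n s hn _
          (PySem.List.mem_pyRange_one.mpr ⟨by omega, by omega⟩))
      · exact h
  · rw [if_neg hn]
    have hn1 : 1 ≤ n := by omega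
    rcases hexp : expected with _ | s
    · -- expected_char is None: common pvAux with no target
      have hA := pvBridgeA n none none hn1 (Or.inl ⟨rfl, rfl⟩) cs cs.length 0 (by omega)
      simp only [Nat.cast_zero, List.drop_zero] at hA
      rw [hA, pvInitB n none none hn1 (by intro c; simp) cs]
    · rcases hsl : s.toList with _ | ⟨e, tl⟩
      · -- empty expected_char: never matches on either side
        rw [pvNeverA cs n s hn1 (by rw [hsl]; simp)
            _ (by intro idx hidx
                  have := PySem.List.mem_pyRange_one.mp hidx
                  omega),
            pvNeverB n s (by rw [hsl]; simp)]
      · rcases htl : tl with _ | ⟨e₂, tl₂⟩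
        · -- single-character expected_char: common pvAux with target e
          have hse : s = String.ofList [e] := by
            symm; rw [String.ofList_eq, hsl, htl]
          have hct : ∀ c : Char,
              ((some s : Option String) = none ∨ some s = some (String.ofList [c])) ↔
                ((some e : Option Char).getD c = c) := by
            intro c
            simp only [reduceCtorEq, false_or, Option.some.injEq, Option.getD_some]
            constructor
            · intro h
              have h2 := congrArg String.toList h
              rw [hsl, htl, String.toList_ofList] at h2
              exact (List.cons_eq_cons.mp h2).1
            · intro h; rw [hse, h]
          have hA := pvBridgeA n (some s) (some e) hn1 (Or.inr ⟨e, by rw [hse], rfl⟩) cs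
              cs.length 0 (by omega)
          simp only [Nat.cast_zero, List.drop_zero] at hA
          rw [hA, pvInitB n (some s) (some e) hn1 hct cs]
        · -- multi-character expected_char: never matches on either side
          rw [pvNeverA cs n s hn1 (by rw [hsl, htl]; simp)
                _ (by intro idx hidx
                      have := PySem.List.mem_pyRange_one.mp hidx
                      omega),
              pvNeverB n s (by rw [hsl, htl]; simp)]
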